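-- pv_equiv track=rewrite | github.com/akashdeeep/Drawing-with-Rotating-Circles | cal_coefficients.py | get_angular_frequencies
-- ===== SOURCE A (Python) =====
-- def get_angular_frequencies(num_coefficients):
--     """
--     Get angular velocities for the given number of Fourier coefficients.
--
--     Args:
--         num_coefficients (int): Number of coefficients.
--
--     Returns:
--         list: List of angular velocities.
--     """
--     w = []
--     cnt = 0
--     while cnt < num_coefficients:
--         if cnt == 0:
--             cnt += 1
--             w += [0]
--         else:
--             w += [(cnt + 1) // 2]
--             cnt += 1
--             if cnt < num_coefficients:
--                 w += [-(cnt) // 2]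
--                 cnt += 1
--     return w
-- ===== SOURCE B (Python) =====
-- def get_angular_frequencies(num_coefficients):
--     """Frequencies 0,1,-1,2,-2,... : the contiguous integer range
--     [-(n-1)//2, n//2] ordered by magnitude, positive before negative."""
--     n = num_coefficients
--     return sorted(range(-((n - 1) // 2), n // 2 + 1),
--                   key=lambda w: 2 * abs(w) + (w < 0))
-- ===== Notes on version B (the rewrite author's own statement) =====
-- stated objective: alternative
-- what changed: Instead of a loop emitting elements one by one, B constructs the result set as the contiguous integer range [-(n-1)//2, n//2] and sorts it by magnitude with positives before negatives (key 2*abs(w)+(w<0)).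
import Mathlib
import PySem

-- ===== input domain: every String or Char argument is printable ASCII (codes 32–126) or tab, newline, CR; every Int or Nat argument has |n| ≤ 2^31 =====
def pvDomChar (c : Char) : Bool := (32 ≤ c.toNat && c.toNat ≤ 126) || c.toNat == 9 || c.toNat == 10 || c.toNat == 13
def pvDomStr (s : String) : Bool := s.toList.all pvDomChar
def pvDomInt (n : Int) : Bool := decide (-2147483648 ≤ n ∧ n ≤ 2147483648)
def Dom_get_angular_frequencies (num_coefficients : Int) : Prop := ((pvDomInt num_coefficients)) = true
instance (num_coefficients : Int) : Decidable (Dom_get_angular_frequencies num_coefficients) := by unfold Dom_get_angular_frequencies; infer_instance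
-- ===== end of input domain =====

-- B builds the answer by a different algorithm: the result set is the contiguous integer
-- range [-(n-1)//2, n//2], sorted by magnitude with positives before negatives;
-- equal return values are proved below (objective: alternative, not faster).
-- ===== PORT A =====
-- literal port of A's while loop: state (w, cnt), two appends per iteration after the first
def pvLoopA (n : Int) (w : List Int) (cnt : Int) : List Int :=
  if _h : cnt < n then
    if cnt = 0 then
      pvLoopA n (w ++ [0]) (cnt + 1)
    else
      let w1 := w ++ [PySem.Int.floordiv (cnt + 1) 2]
      let cnt1 := cnt + 1
      if _h2 : cnt1 < n then
        pvLoopA n (w1 ++ [PySem.Int.floordiv (-cnt1) 2]) (cnt1 + 1)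
      else
        w1
  else
    w
termination_by (n - cnt).toNat
decreasing_by all_goals omega

def get_angular_frequencies (num_coefficients : Int) : List Int :=
  pvLoopA num_coefficients [] 0

-- ===== PORT B =====
-- literal port of B: sorted(range(-((n-1)//2), n//2 + 1), key=lambda w: 2*abs(w) + (w < 0))
def get_angular_frequencies_alt (num_coefficients : Int) : List Int :=
  PySem.List.sorted
    (PySem.List.pyRange (-(PySem.Int.floordiv (num_coefficients - 1) 2))
                        (PySem.Int.floordiv num_coefficients 2 + 1))
    (fun w => 2 * |w| + (if w < 0 then 1 else 0))

-- ===== PRECONDITION & SPEC =====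
def Spec_get_angular_frequencies (num_coefficients : Int) (out : List Int) : Prop := out = get_angular_frequencies_alt num_coefficients
instance (num_coefficients : Int) (out : List Int) : Decidable (Spec_get_angular_frequencies num_coefficients out) := by unfold Spec_get_angular_frequencies; infer_instance

-- ===== CLAIM (what is proved, stated in full; the proofs are below) =====
def Claim_equal_get_angular_frequencies : Prop := ∀ (num_coefficients : Int), Dom_get_angular_frequencies num_coefficients → Spec_get_angular_frequencies num_coefficients (get_angular_frequencies num_coefficients)

-- ===== LEMMAS AND PROOFS =====

-- the common reference list: element at index i is 0 at i = 0, (i+1)/2 for odd i, -(i/2) for even i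
def pvElem (i : Int) : Int := if i % 2 = 1 then (i + 1) / 2 else -(i / 2)

def pvT (n : Int) : List Int := (PySem.List.pyRange 0 n).map pvElem

-- B's sort key
def pvKey (w : Int) : Int := 2 * |w| + (if w < 0 then 1 else 0)

lemma pvRange_nil {a b : Int} (h : b ≤ a) : PySem.List.pyRange a b = [] := by
  simp [PySem.List.pyRange]
  intro h'
  omega

-- A's loop equals the reference list from cnt on (cnt = 0 or odd)
lemma pvLoopA_eq (k : Nat) : ∀ (n : Int) (w : List Int) (cnt : Int), (n - cnt).toNat ≤ k →
    (cnt = 0 ∨ (0 < cnt ∧ cnt % 2 = 1)) →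
    pvLoopA n w cnt = w ++ (PySem.List.pyRange cnt n).map pvElem := by
  induction k with
  | zero =>
    intro n w cnt hk _
    rw [pvLoopA, dif_neg (by omega), pvRange_nil (by omega)]
    simp
  | succ k ih =>
    intro n w cnt hk hpar
    by_cases hlt : cnt < n
    · rw [PySem.List.pyRange_one_cons hlt]
      rcases hpar with h0 | ⟨h2, hodd⟩
      · subst h0
        rw [pvLoopA, dif_pos hlt, if_pos rfl]
        simp only [zero_add]
        rw [ih n (w ++ [0]) 1 (by omega) (Or.inr (by norm_num))]
        simp [pvElem]
      · have hne : cnt ≠ 0 := by omega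
        rw [pvLoopA, dif_pos hlt, if_neg hne]
        have hv1 : PySem.Int.floordiv (cnt + 1) 2 = pvElem cnt := by
          rw [PySem.Int.floordiv_eq_ediv_of_pos (by omega), pvElem, if_pos hodd]
        simp only [hv1]
        by_cases h3 : cnt + 1 < n
        · rw [dif_pos h3, PySem.List.pyRange_one_cons h3]
          have hv2 : PySem.Int.floordiv (-(cnt + 1)) 2 = pvElem (cnt + 1) := by
            rw [PySem.Int.floordiv_eq_ediv_of_pos (by omega), pvElem,
              if_neg (by omega)]
            omega
          rw [hv2, ih n _ (cnt + 1 + 1) (by omega) (Or.inr ⟨by omega, by omega⟩)]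
          simp
        · rw [dif_neg h3, pvRange_nil (by omega)]
          simp
    · rw [pvLoopA, dif_neg hlt, pvRange_nil (by omega)]
      simp

-- key of the reference element at index i
lemma pvKey_elem (i : Int) (h : 0 ≤ i) : pvKey (pvElem i) = if i = 0 then 0 else i + 1 := by
  unfold pvKey pvElem
  by_cases hodd : i % 2 = 1
  · rw [if_pos hodd]
    have h1 : 0 < (i + 1) / 2 := by omega
    rw [abs_of_nonneg (by omega), if_neg (by omega), if_neg (by omega)]
    omega
  · rw [if_neg hodd]
    by_cases h0 : i = 0
    · subst h0; decide
    · have h1 : 0 < i / 2 := by omega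
      rw [abs_of_neg (by omega), if_pos (by omega), if_neg h0]
      omega

-- the reference list is strictly increasing under B's key
lemma pvT_pairwise (n : Int) : (pvT n).Pairwise (fun a b => pvKey a < pvKey b) := by
  unfold pvT
  by_cases h : n ≤ 0
  · rw [pvRange_nil h]; simp
  · rw [show n = ((n.toNat : Nat) : Int) by omega, PySem.List.pyRange_zero_natCast,
      List.map_map, List.pairwise_map]
    refine List.pairwise_lt_range.imp ?_
    intro a b hab
    simp only [Function.comp]
    rw [pvKey_elem _ (by omega), pvKey_elem _ (by omega)]
    have : (a : Int) < (b : Int) := by exact_mod_cast hab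
    split_ifs <;> omega

-- the reference list is a permutation of B's integer range
lemma pvT_perm (m : Nat) :
    (pvT (m : Int)).Perm
      (PySem.List.pyRange (-(((m : Int) - 1) / 2)) ((m : Int) / 2 + 1)) := by
  induction m with
  | zero =>
    unfold pvT
    rw [pvRange_nil (by omega), pvRange_nil (by norm_num)]
    simp
  | succ m ih =>
    unfold pvT at *
    by_cases hm0 : m = 0
    · subst hm0; decide
    · have hm1 : (1 : Int) ≤ (m : Int) := by exact_mod_cast Nat.one_le_iff_ne_zero.mpr hm0
      have hstep : PySem.List.pyRange 0 ((m : Int) + 1)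
          = PySem.List.pyRange 0 (m : Int) ++ [(m : Int)] :=
        PySem.List.pyRange_one_succ_right (by omega)
      push_cast
      rw [hstep, List.map_append]
      by_cases hev : (m : Int) % 2 = 0
      · -- even m: the new element is the new low endpoint
        have hlo : -(((m : Int) + 1 - 1) / 2) = -(((m : Int) - 1) / 2) - 1 := by omega
        have hhi : ((m : Int) + 1) / 2 = (m : Int) / 2 := by omega
        have helem : pvElem (m : Int) = -(((m : Int) - 1) / 2) - 1 := by
          unfold pvElem; rw [if_neg (by omega)]; omega
        rw [hlo, hhi,
          PySem.List.pyRange_one_cons (show -(((m : Int) - 1) / 2) - 1 < (m : Int) / 2 + 1 by omega),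
          show -(((m : Int) - 1) / 2) - 1 + 1 = -(((m : Int) - 1) / 2) by ring]
        simp only [List.map_cons, List.map_nil]
        exact (List.perm_append_singleton _ _).trans (by rw [helem]; exact ih.cons _)
      · -- odd m: the new element is the new high endpoint
        have hlo : -(((m : Int) + 1 - 1) / 2) = -(((m : Int) - 1) / 2) := by omega
        have hhi : ((m : Int) + 1) / 2 + 1 = ((m : Int) / 2 + 1) + 1 := by omega
        have helem : pvElem (m : Int) = (m : Int) / 2 + 1 := by
          unfold pvElem; rw [if_pos (by omega)]; omega
        rw [hlo, hhi,
          PySem.List.pyRange_one_succ_right (show -(((m : Int) - 1) / 2) ≤ (m : Int) / 2 + 1 by omega)]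
        simp only [List.map_cons, List.map_nil]
        rw [helem]
        exact ih.append (List.Perm.refl _)

-- B equals the reference list
lemma pvB_eq (n : Int) : get_angular_frequencies_alt n = pvT n := by
  unfold get_angular_frequencies_alt
  by_cases h : n ≤ 0
  · have h1 : PySem.Int.floordiv n 2 + 1 ≤ -(PySem.Int.floordiv (n - 1) 2) := by
      rw [PySem.Int.floordiv_eq_ediv_of_pos (show (0:Int) < 2 by norm_num),
        PySem.Int.floordiv_eq_ediv_of_pos (show (0:Int) < 2 by norm_num)]
      omega
    rw [pvRange_nil h1]
    unfold pvT
    rw [pvRange_nil h]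
    rfl
  · have hpos : 0 < n := by omega
    rw [PySem.Int.floordiv_eq_ediv_of_pos (show (0:Int) < 2 by norm_num),
      PySem.Int.floordiv_eq_ediv_of_pos (show (0:Int) < 2 by norm_num)]
    have hperm : (pvT n).Perm (PySem.List.pyRange (-((n - 1) / 2)) (n / 2 + 1)) := by
      have := pvT_perm n.toNat
      rwa [show ((n.toNat : Nat) : Int) = n by omega] at this
    exact PySem.List.sorted_eq_of_perm_of_pairwise_lt _ _ pvKey hperm (pvT_pairwise n)

-- ===== VERDICT (by name: the statement is the Claim_ definition above) =====
theorem get_angular_frequencies_spec : Claim_equal_get_angular_frequencies := by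
  intro n _
  unfold Spec_get_angular_frequencies get_angular_frequencies
  rw [pvB_eq, pvLoopA_eq (n - 0).toNat n [] 0 (le_refl _) (Or.inl rfl)]
  rfl
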